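-- pv_equiv track=rewrite | github.com/tusktenon/hyperskill-python-projects | XmasTree/stage3.py | tree_rows
-- ===== SOURCE A (Python) =====
-- def tree_rows(height, interval):
--     decoration_slot = 0
--     rows = ['X', '^']
--     for i in range(1, height):
--         row = ['/']
--         for j in range(2 * i - 1):
--             if j % 2 == 1:
--                 row.append('O' if decoration_slot % interval == 0 else '*')
--                 decoration_slot += 1
--             else:
--                 row.append('*')
--         row.append('\\')
--         rows.append(''.join(row))
--     rows.append('| |')
--     return rows
-- ===== SOURCE B (Python) =====
-- def tree_rows(height, interval):
--     # Closed-form global decoration index: row i (1-based) uses decoration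
--     # indices starting at (i-1)*(i-2)//2, so no running counter is needed.
--     def deco(g):
--         return 'O' if g % interval == 0 else '*'
--     body = ['/' + '*' + ''.join(deco((i - 1) * (i - 2) // 2 + k) + '*'
--                                 for k in range(i - 1)) + '\\'
--             for i in range(1, height)]
--     return ['X', '^'] + body + ['| |']
-- ===== Notes on version B (the rewrite author's own statement) =====
-- stated objective: simpler
-- what changed: B replaces A's running decoration counter and inner parity loop (j % 2 over 2i-1 positions) with a closed-form global decoration index (i-1)*(i-2)//2 per row and a per-row comprehension joining deco+'*' pairs.
import Mathlib
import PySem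

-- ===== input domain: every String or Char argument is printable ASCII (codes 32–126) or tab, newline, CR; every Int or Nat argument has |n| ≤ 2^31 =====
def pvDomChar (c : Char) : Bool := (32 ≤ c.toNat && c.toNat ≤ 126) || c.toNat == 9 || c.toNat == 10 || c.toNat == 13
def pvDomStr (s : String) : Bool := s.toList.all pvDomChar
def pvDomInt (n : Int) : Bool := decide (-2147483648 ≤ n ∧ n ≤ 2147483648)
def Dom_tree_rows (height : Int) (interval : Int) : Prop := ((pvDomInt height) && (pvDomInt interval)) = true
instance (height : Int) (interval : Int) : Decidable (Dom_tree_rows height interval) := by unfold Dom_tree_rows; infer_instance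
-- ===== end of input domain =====

-- B replaces A's running decoration counter and inner parity loop with a
-- closed-form global decoration index (i-1)*(i-2)//2 per row (objective: simpler).

-- ===== PORT A =====
def trInnerStep (interval : Int) (rj : Int × List Char) (j : Int) : Int × List Char :=
  if PySem.Int.mod j 2 == 1 then
    (rj.1 + 1, rj.2 ++ [if PySem.Int.mod rj.1 interval == 0 then 'O' else '*'])
  else
    (rj.1, rj.2 ++ ['*'])

def trOuterStep (interval : Int) (st : Int × List String) (i : Int) : Int × List String :=
  let inner := (PySem.List.pyRange 0 (2*i-1) 1).foldl (trInnerStep interval) (st.1, ['/'])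
  (inner.1, st.2 ++ [String.ofList (inner.2 ++ ['\\'])])

def tree_rows (height : Int) (interval : Int) : List String :=
  ((PySem.List.pyRange 1 height 1).foldl (trOuterStep interval) (0, ["X", "^"])).2 ++ ["| |"]

-- ===== PORT B =====
def trAltDeco (interval : Int) (g : Int) : Char :=
  if PySem.Int.mod g interval == 0 then 'O' else '*'

def trAltRow (interval : Int) (i : Int) : String :=
  String.ofList ('/' :: '*' ::
    ((PySem.List.pyRange 0 (i-1) 1).flatMap
      (fun k => [trAltDeco interval (PySem.Int.floordiv ((i-1)*(i-2)) 2 + k), '*']) ++ ['\\']))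

def tree_rows_alt (height : Int) (interval : Int) : List String :=
  ["X", "^"] ++ (PySem.List.pyRange 1 height 1).map (trAltRow interval) ++ ["| |"]

-- ===== PRECONDITION & SPEC =====
-- Pre_ excludes interval = 0 with height ≥ 3: there the Python A raises
-- ZeroDivisionError at the first decoration slot (as does B).
def Pre_tree_rows (height : Int) (interval : Int) : Prop := interval ≠ 0 ∨ height ≤ 2
instance (height : Int) (interval : Int) : Decidable (Pre_tree_rows height interval) := by
  unfold Pre_tree_rows; infer_instance

def pvWitness_tree_rows : Int × Int := (5, 3)

def Spec_tree_rows (height : Int) (interval : Int) (out : List String) : Prop := out = tree_rows_alt height interval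
instance (height : Int) (interval : Int) (out : List String) : Decidable (Spec_tree_rows height interval out) := by unfold Spec_tree_rows; infer_instance

-- ===== CLAIM (what is proved, stated in full; the proofs are below) =====
def Claim_equal_tree_rows : Prop := ∀ (height : Int) (interval : Int), Dom_tree_rows height interval → Pre_tree_rows height interval → Spec_tree_rows height interval (tree_rows height interval)

-- ===== LEMMAS AND PROOFS =====

-- A's inner loop over range(2m+1), started at counter s, emits '*' and then
-- (deco, '*') pairs for the m global slots s, s+1, …, s+m-1.
lemma tr_inner (interval : Int) (m : Nat) (s : Int) (acc : List Char) :
    (PySem.List.pyRange 0 (2*(m:Int)+1) 1).foldl (trInnerStep interval) (s, acc)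
    = (s + m, acc ++ '*' ::
        (PySem.List.pyRange 0 (m:Int) 1).flatMap
          (fun k => [trAltDeco interval (s+k), '*'])) := by
  induction m with
  | zero =>
      rw [show (2*((0:Nat):Int)+1) = 0+1 by norm_num, PySem.List.pyRange_one_singleton]
      simp [PySem.List.pyRange_one_eq_nil, trInnerStep]
  | succ m ih =>
      have hsplit : PySem.List.pyRange 0 (2*((m:Int)+1)+1) 1
          = PySem.List.pyRange 0 (2*(m:Int)+1) 1 ++ [2*(m:Int)+1, 2*(m:Int)+2] := by
        rw [PySem.List.pyRange_one_append 0 (2*(m:Int)+1) (2*((m:Int)+1)+1) (by omega) (by omega),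
            PySem.List.pyRange_one_cons (show (2*(m:Int)+1) < 2*((m:Int)+1)+1 by omega),
            PySem.List.pyRange_one_cons (show (2*(m:Int)+1+1) < 2*((m:Int)+1)+1 by omega),
            PySem.List.pyRange_one_eq_nil (show (2*((m:Int)+1)+1 ≤ 2*(m:Int)+1+1+1) by omega)]
        norm_num
        omega
      have hpeel : PySem.List.pyRange 0 ((m:Int)+1) 1
          = PySem.List.pyRange 0 (m:Int) 1 ++ [(m:Int)] :=
        PySem.List.pyRange_one_succ_right (by omega)
      push_cast
      rw [hsplit, List.foldl_append, ih]
      simp [trInnerStep, hpeel, trAltDeco]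
      omega

-- counter bookkeeping in ediv form: slots used by rows 1..n plus row n+1's n slots
lemma tr_base' (n : Nat) :
    ((n:Int)*((n:Int)-1))/2 + n = (((n:Int)+1)*(n:Int))/2 := by
  have h : ((n:Int)+1)*(n:Int) = (n:Int)*((n:Int)-1) + (n:Int)*2 := by ring
  rw [h, Int.add_mul_ediv_right _ _ (by norm_num)]

-- A's outer loop over range(1, 1+n): the counter is the closed form n(n-1)//2
-- and the accumulated rows are exactly B's mapped rows.
lemma tr_outer (interval : Int) (n : Nat) :
    (PySem.List.pyRange 1 (1+(n:Int)) 1).foldl (trOuterStep interval) (0, ["X", "^"])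
    = (PySem.Int.floordiv ((n:Int)*((n:Int)-1)) 2,
       ["X", "^"] ++ (PySem.List.pyRange 1 (1+(n:Int)) 1).map (trAltRow interval)) := by
  induction n with
  | zero => simp [PySem.List.pyRange_one_eq_nil]
  | succ n ih =>
      have hpeel : PySem.List.pyRange 1 (1+((n:Int)+1)) 1
          = PySem.List.pyRange 1 (1+(n:Int)) 1 ++ [1+(n:Int)] := by
        have h := PySem.List.pyRange_one_succ_right (a := 1) (b := 1+(n:Int)) (by omega)
        rw [show (1+((n:Int)+1)) = (1+(n:Int))+1 by ring, h]
      push_cast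
      rw [hpeel, List.foldl_append, ih]
      simp only [List.foldl_cons, List.foldl_nil, trOuterStep]
      have h2 : 2*(1+(n:Int))-1 = 2*(n:Int)+1 := by ring
      rw [h2, tr_inner]
      simp [trAltRow]
      constructor
      · exact tr_base' n
      · rw [show (1:Int)+(n:Int)-2 = (n:Int)-1 by ring]

-- ===== VERDICT (by name: the statement is the Claim_ definition above) =====
theorem tree_rows_spec : Claim_equal_tree_rows := by
  intro height interval _ _
  unfold Spec_tree_rows tree_rows tree_rows_alt
  by_cases h : height ≤ 1
  · rw [PySem.List.pyRange_one_eq_nil h]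
    simp
  · have hn : height = 1 + ((height - 1).toNat : Int) := by omega
    rw [hn, tr_outer]
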